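-- pv_equiv track=rewrite | github.com/apollo994/annocli | src/annocli/core/stats_helpers.py | buil_transcript_columns
-- ===== SOURCE A (Python) =====
-- def buil_transcript_columns(transcript_types):
--     """
--     builder for transcript statistics column
--     """
--     cols = []
--     for transcript_type in transcript_types:
--         cols.append(f"{transcript_type}.total_count")
--         cols.append(f"{transcript_type}.length_stats.min")
--         cols.append(f"{transcript_type}.length_stats.max")
--         cols.append(f"{transcript_type}.length_stats.mean")
--         cols.append(f"{transcript_type}.exons.total_count")
--         cols.append(f"{transcript_type}.exon_stats.length.min")
--         cols.append(f"{transcript_type}.exon_stats.length.max")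
--         cols.append(f"{transcript_type}.exon_stats.length.mean")
--         cols.append(f"{transcript_type}.exon_stats.concatenated_length.min")
--         cols.append(f"{transcript_type}.exon_stats.concatenated_length.max")
--         cols.append(f"{transcript_type}.exon_stats.concatenated_length.mean")
--         cols.append(f"{transcript_type}.cds_stats.total_count")
--         cols.append(f"{transcript_type}.cds_stats.length.min")
--         cols.append(f"{transcript_type}.cds_stats.length.max")
--         cols.append(f"{transcript_type}.cds_stats.length.mean")
--         cols.append(f"{transcript_type}.cds_stats.concatenated_length.min")
--         cols.append(f"{transcript_type}.cds_stats.concatenated_length.max")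
--         cols.append(f"{transcript_type}.cds_stats.concatenated_length.mean")
--
--     return cols
-- ===== SOURCE B (Python) =====
-- # Columns are root-to-leaf paths of a schema tree, expanded by recursion.
-- _MMM = tuple((f, ()) for f in ("min", "max", "mean"))
--
-- _SCHEMA = (
--     ("total_count", ()),
--     ("length_stats", _MMM),
--     ("exons", (("total_count", ()),)),
--     ("exon_stats", (("length", _MMM), ("concatenated_length", _MMM))),
--     ("cds_stats", (("total_count", ()), ("length", _MMM), ("concatenated_length", _MMM))),
-- )
--
-- def _expand(prefix, children, out):
--     """append every root-to-leaf path under `prefix` to `out` (depth-first)."""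
--     if not children:
--         out.append(prefix)
--     else:
--         for name, sub in children:
--             _expand(prefix + "." + name, sub, out)
--
-- def buil_transcript_columns(transcript_types):
--     """
--     builder for transcript statistics column
--     """
--     cols = []
--     for t in transcript_types:
--         for name, sub in _SCHEMA:
--             _expand(t + "." + name, sub, cols)
--     return cols
-- ===== Notes on version B (the rewrite author's own statement) =====
-- stated objective: alternative
-- what changed: Columns are generated as root-to-leaf paths of an explicit schema tree by a recursive depth-first expansion instead of 18 hard-coded unrolled appends.
import Mathlib
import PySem

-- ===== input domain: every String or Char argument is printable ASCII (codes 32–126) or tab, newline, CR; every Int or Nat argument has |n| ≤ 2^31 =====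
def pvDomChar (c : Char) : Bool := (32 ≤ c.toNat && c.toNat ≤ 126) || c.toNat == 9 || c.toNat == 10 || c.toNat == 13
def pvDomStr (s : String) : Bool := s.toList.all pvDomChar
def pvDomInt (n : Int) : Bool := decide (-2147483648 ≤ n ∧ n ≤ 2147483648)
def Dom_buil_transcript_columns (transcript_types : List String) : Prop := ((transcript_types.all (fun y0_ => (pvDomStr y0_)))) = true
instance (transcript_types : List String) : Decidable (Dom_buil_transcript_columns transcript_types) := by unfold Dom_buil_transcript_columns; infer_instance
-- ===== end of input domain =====

-- B generates the 18 columns per type as root-to-leaf paths of a schema tree via recursive DFS expansion (alternative decomposition, same cost).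


-- ===== PORT A =====
-- literal transliteration: cols starts empty, each iteration appends 18 strings one by one
def buil_transcript_columns (transcript_types : List String) : List String :=
  transcript_types.foldl (fun cols t =>
    ((((((((((((((((((cols ++ [t ++ ".total_count"])
      ++ [t ++ ".length_stats.min"])
      ++ [t ++ ".length_stats.max"])
      ++ [t ++ ".length_stats.mean"])
      ++ [t ++ ".exons.total_count"])
      ++ [t ++ ".exon_stats.length.min"])
      ++ [t ++ ".exon_stats.length.max"])
      ++ [t ++ ".exon_stats.length.mean"])
      ++ [t ++ ".exon_stats.concatenated_length.min"])
      ++ [t ++ ".exon_stats.concatenated_length.max"])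
      ++ [t ++ ".exon_stats.concatenated_length.mean"])
      ++ [t ++ ".cds_stats.total_count"])
      ++ [t ++ ".cds_stats.length.min"])
      ++ [t ++ ".cds_stats.length.max"])
      ++ [t ++ ".cds_stats.length.mean"])
      ++ [t ++ ".cds_stats.concatenated_length.min"])
      ++ [t ++ ".cds_stats.concatenated_length.max"])
      ++ [t ++ ".cds_stats.concatenated_length.mean"])) []

-- ===== PORT B =====
-- a forest of named nodes: cons carries the node name, its child forest and the remaining siblings
inductive PvForest : Type
  | nil : PvForest
  | cons : String → PvForest → PvForest → PvForest

-- the `(min, max, mean)` leaf triple of Source B's _MMM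
def pvMMM : PvForest :=
  .cons "min" .nil (.cons "max" .nil (.cons "mean" .nil .nil))

-- Source B's _SCHEMA
def pvSchema : PvForest :=
  .cons "total_count" .nil
  (.cons "length_stats" pvMMM
  (.cons "exons" (.cons "total_count" .nil .nil)
  (.cons "exon_stats" (.cons "length" pvMMM (.cons "concatenated_length" pvMMM .nil))
  (.cons "cds_stats" (.cons "total_count" .nil
                     (.cons "length" pvMMM (.cons "concatenated_length" pvMMM .nil)))
  .nil))))

-- Source B's _expand: if no children emit the pfx, else recurse into each child
mutual
  def pvExpand (pfx : String) (children : PvForest) (out : List String) : List String :=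
    match children with
    | .nil => out ++ [pfx]
    | .cons name sub rest => pvIter pfx (.cons name sub rest) out
  -- the `for name, sub in children` loop inside _expand
  def pvIter (pfx : String) (children : PvForest) (out : List String) : List String :=
    match children with
    | .nil => out
    | .cons name sub rest => pvIter pfx rest (pvExpand (pfx ++ "." ++ name) sub out)
end

def buil_transcript_columns_alt (transcript_types : List String) : List String :=
  transcript_types.foldl (fun cols t => pvIter t pvSchema cols) []

-- ===== PRECONDITION & SPEC =====
def Spec_buil_transcript_columns (transcript_types : List String) (out : List String) : Prop := out = buil_transcript_columns_alt transcript_types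
instance (transcript_types : List String) (out : List String) : Decidable (Spec_buil_transcript_columns transcript_types out) := by unfold Spec_buil_transcript_columns; infer_instance

-- ===== CLAIM (what is proved, stated in full; the proofs are below) =====
def Claim_equal_buil_transcript_columns : Prop := ∀ (transcript_types : List String), Dom_buil_transcript_columns transcript_types → Spec_buil_transcript_columns transcript_types (buil_transcript_columns transcript_types)

-- ===== LEMMAS AND PROOFS =====

-- one fold step of B expands the schema tree into exactly the 18 strings A appends
lemma pv_step_eq (cols : List String) (t : String) :
    pvIter t pvSchema cols =
    ((((((((((((((((((cols ++ [t ++ ".total_count"])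
      ++ [t ++ ".length_stats.min"])
      ++ [t ++ ".length_stats.max"])
      ++ [t ++ ".length_stats.mean"])
      ++ [t ++ ".exons.total_count"])
      ++ [t ++ ".exon_stats.length.min"])
      ++ [t ++ ".exon_stats.length.max"])
      ++ [t ++ ".exon_stats.length.mean"])
      ++ [t ++ ".exon_stats.concatenated_length.min"])
      ++ [t ++ ".exon_stats.concatenated_length.max"])
      ++ [t ++ ".exon_stats.concatenated_length.mean"])
      ++ [t ++ ".cds_stats.total_count"])
      ++ [t ++ ".cds_stats.length.min"])
      ++ [t ++ ".cds_stats.length.max"])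
      ++ [t ++ ".cds_stats.length.mean"])
      ++ [t ++ ".cds_stats.concatenated_length.min"])
      ++ [t ++ ".cds_stats.concatenated_length.max"])
      ++ [t ++ ".cds_stats.concatenated_length.mean"]) := by
  simp [pvSchema, pvMMM, pvIter, pvExpand, String.append_assoc]

-- ===== VERDICT (by name: the statement is the Claim_ definition above) =====
theorem buil_transcript_columns_spec : Claim_equal_buil_transcript_columns := by
  intro ts _
  unfold Spec_buil_transcript_columns buil_transcript_columns buil_transcript_columns_alt
  -- rewriting B's fold step (pv_step_eq) under the binder makes the two folds syntactically equal
  simp only [pv_step_eq]
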